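-- pv_equiv track=rewrite | github.com/Antonescu-Denis/Algorithm-Visualiser | Algorithm_Visualiser.py | GetColourArrayQ
-- ===== SOURCE A (Python) =====
-- def GetColourArrayQ(length, head, tail, border, curr_idx):
--     colours = []
--     for i in range(length):
--         if i >= head and i <= tail:
--              colours.append('white')
--         else:
--              colours.append('gray')
--
--         if i == tail:
--             colours[i] = 'blue'
--         elif i == border:
--             colours[i] = 'red'
--         elif i == curr_idx:
--             colours[i] = 'yellow'
--     return colours
-- ===== SOURCE B (Python) =====
-- def GetColourArrayQ(length, head, tail, border, curr_idx):
--     # Emit the answer as a concatenation of runs: compute the (deduplicated,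
--     # priority-filtered) override points, sort them, and between consecutive
--     # points output the base band (gray/white/gray) as replicated chunks.
--     # No array is allocated up front and no cell is ever overwritten.
--     lo = max(head, 0)                     # white band is [lo, hi)
--     hi = max(min(tail, length - 1) + 1, lo)
--
--     def run(a, b):
--         # base colours for indices [a, b): gray before lo, white in [lo, hi), gray after
--         g1 = max(min(b, lo) - a, 0)
--         w = max(min(b, hi) - max(a, lo), 0)
--         g2 = max(b - max(a, hi), 0)
--         return ['gray'] * g1 + ['white'] * w + ['gray'] * g2
--
--     points = []
--     for idx, col in ((tail, 'blue'), (border, 'red'), (curr_idx, 'yellow')):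
--         if 0 <= idx < length and all(idx != p for p, _ in points):
--             points.append((idx, col))
--     points.sort(key=lambda p: p[0])
--
--     out = []
--     pos = 0
--     for idx, col in points:
--         out += run(pos, idx)
--         out.append(col)
--         pos = idx + 1
--     out += run(pos, length)
--     return out
-- ===== Notes on version B (the rewrite author's own statement) =====
-- stated objective: faster
-- what changed: Instead of looping per index with conditional overwrites, B collects the (priority-filtered, deduplicated) override points, sorts them, and emits the output as a concatenation of replicated gray/white run chunks between consecutive points, never allocating or overwriting an array cell.
import Mathlib
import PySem

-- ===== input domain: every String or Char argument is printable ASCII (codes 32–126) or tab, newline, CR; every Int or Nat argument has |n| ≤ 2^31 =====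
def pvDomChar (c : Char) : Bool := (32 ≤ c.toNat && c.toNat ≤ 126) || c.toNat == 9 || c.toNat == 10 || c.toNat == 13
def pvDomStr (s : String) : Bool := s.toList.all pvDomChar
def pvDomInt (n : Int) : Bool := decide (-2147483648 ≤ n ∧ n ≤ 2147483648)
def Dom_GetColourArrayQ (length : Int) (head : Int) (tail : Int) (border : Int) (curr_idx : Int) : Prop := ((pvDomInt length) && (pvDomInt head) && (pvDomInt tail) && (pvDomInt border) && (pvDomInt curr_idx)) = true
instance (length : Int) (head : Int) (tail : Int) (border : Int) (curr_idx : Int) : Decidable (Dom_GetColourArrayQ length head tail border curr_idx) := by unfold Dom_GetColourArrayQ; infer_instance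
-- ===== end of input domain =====

-- B builds the result as a concatenation of runs: it collects the (deduplicated, priority-filtered)
-- override points, sorts them, and emits replicated gray/white chunks between consecutive points —
-- no per-index loop and no cell is ever overwritten; return values proved equal.

-- ===== PORT A =====
def GetColourArrayQ (length : Int) (head : Int) (tail : Int) (border : Int) (curr_idx : Int) : List String :=
  (PySem.List.pyRange 0 length 1).foldl (fun colours i =>
    let colours := colours ++ [if i ≥ head ∧ i ≤ tail then "white" else "gray"]
    -- colours[i] = …  (i is always a valid nonnegative index here; pySetD is exact)
    if i = tail then PySem.List.pySetD colours i "blue"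
    else if i = border then PySem.List.pySetD colours i "red"
    else if i = curr_idx then PySem.List.pySetD colours i "yellow"
    else colours) []

-- ===== PORT B =====
-- Source B's nested helper run(a, b): base colours for indices [a,b) as three replicated chunks
def pvRunB (lo hi a b : Int) : List String :=
  List.replicate (max (min b lo - a) 0).toNat "gray" ++
  List.replicate (max (min b hi - max a lo) 0).toNat "white" ++
  List.replicate (max (b - max a hi) 0).toNat "gray"

def GetColourArrayQ_alt (length : Int) (head : Int) (tail : Int) (border : Int) (curr_idx : Int) : List String :=
  let lo := max head 0
  let hi := max (min tail (length - 1) + 1) lo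
  let points := [((tail : Int), "blue"), (border, "red"), (curr_idx, "yellow")].foldl
    (fun pts ic =>
      if 0 ≤ ic.1 ∧ ic.1 < length ∧ pts.all (fun p => decide (ic.1 ≠ p.1)) = true
      then pts ++ [ic] else pts) []
  let pts := PySem.List.sorted points (fun p => p.1)
  let r := pts.foldl (fun s ic => (s.1 ++ pvRunB lo hi s.2 ic.1 ++ [ic.2], ic.1 + 1))
    (([] : List String), (0 : Int))
  r.1 ++ pvRunB lo hi r.2 length

-- ===== PRECONDITION & SPEC =====
def Spec_GetColourArrayQ (length : Int) (head : Int) (tail : Int) (border : Int) (curr_idx : Int) (out : List String) : Prop := out = GetColourArrayQ_alt length head tail border curr_idx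
instance (length : Int) (head : Int) (tail : Int) (border : Int) (curr_idx : Int) (out : List String) : Decidable (Spec_GetColourArrayQ length head tail border curr_idx out) := by unfold Spec_GetColourArrayQ; infer_instance

-- ===== CLAIM (what is proved, stated in full; the proofs are below) =====
def Claim_equal_GetColourArrayQ : Prop := ∀ (length : Int) (head : Int) (tail : Int) (border : Int) (curr_idx : Int), Dom_GetColourArrayQ length head tail border curr_idx → Spec_GetColourArrayQ length head tail border curr_idx (GetColourArrayQ length head tail border curr_idx)

-- ===== LEMMAS AND PROOFS =====

/-- The colour both programs assign to index `i`. -/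
def pvColourAt (head tail border curr_idx : Int) (i : Int) : String :=
  if i = tail then "blue"
  else if i = border then "red"
  else if i = curr_idx then "yellow"
  else if head ≤ i ∧ i ≤ tail then "white" else "gray"

/-- The base (band) colour of index `i`: white on `[lo, hi)`, gray elsewhere. -/
def pvBase (lo hi i : Int) : String := if lo ≤ i ∧ i < hi then "white" else "gray"

/-- `map f` over the integer interval `[a, b)`. -/
def pvSeg (f : Int → String) (a b : Int) : List String :=
  (List.range (b - a).toNat).map (fun (j : Nat) => f (a + (j : Int)))

-- ---- A-side: the loop produces pvColourAt pointwise ----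

theorem pv_set_last (xs : List String) (e v : String) :
    (xs ++ [e]).set xs.length v = xs ++ [v] := by
  induction xs with
  | nil => simp
  | cons a t ih => simp [ih]

theorem pvA_loop (head tail border curr_idx : Int) (n : Nat) :
    List.foldl (fun colours i =>
      let colours := colours ++ [if i ≥ head ∧ i ≤ tail then "white" else "gray"]
      if i = tail then PySem.List.pySetD colours i "blue"
      else if i = border then PySem.List.pySetD colours i "red"
      else if i = curr_idx then PySem.List.pySetD colours i "yellow"
      else colours) [] ((List.range n).map (fun (k : Nat) => (k : Int)))
    = (List.range n).map (fun (k : Nat) => pvColourAt head tail border curr_idx (k : Int)) := by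
  induction n with
  | zero => rfl
  | succ m ih =>
    rw [List.range_succ, List.map_append, List.map_append, List.foldl_append, ih]
    simp only [List.map_cons, List.map_nil, List.foldl_cons, List.foldl_nil]
    have hL : ((List.range m).map (fun (k : Nat) => pvColourAt head tail border curr_idx (k : Int))).length = m := by
      rw [List.length_map, List.length_range]
    have hset : ∀ v e : String,
        PySem.List.pySetD (((List.range m).map (fun (k : Nat) => pvColourAt head tail border curr_idx (k : Int))) ++ [e]) ((m : Nat) : Int) v
          = ((List.range m).map (fun (k : Nat) => pvColourAt head tail border curr_idx (k : Int))) ++ [v] := by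
      intro v e
      rw [PySem.List.pySetD_natCast]
      have h := pv_set_last ((List.range m).map (fun (k : Nat) => pvColourAt head tail border curr_idx (k : Int))) e v
      rwa [hL] at h
    simp only [hset, ge_iff_le]
    simp only [pvColourAt]
    split_ifs <;> rfl

theorem pvA_eq_map (length head tail border curr_idx : Int) :
    GetColourArrayQ length head tail border curr_idx
      = (List.range length.toNat).map (fun (k : Nat) => pvColourAt head tail border curr_idx (k : Int)) := by
  unfold GetColourArrayQ
  rw [PySem.List.pyRange_one]
  simp only [zero_add, sub_zero]
  exact pvA_loop head tail border curr_idx length.toNat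

-- ---- B-side: run = segment of base colours; segments glue ----

theorem pvSeg_append (f : Int → String) (a m b : Int) (h1 : a ≤ m) (h2 : m ≤ b) :
    pvSeg f a m ++ pvSeg f m b = pvSeg f a b := by
  unfold pvSeg
  have h : (b - a).toNat = (m - a).toNat + (b - m).toNat := by omega
  rw [h, List.range_add, List.map_append, List.map_map]
  congr 1
  apply List.map_congr_left
  intro j hj
  simp only [Function.comp_apply]
  congr 1
  omega

theorem pvSeg_single (f : Int → String) (k : Int) : pvSeg f k (k + 1) = [f k] := by
  unfold pvSeg
  have h : (k + 1 - k).toNat = 1 := by omega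
  rw [h, List.range_one]
  simp

theorem pvSeg_const (f : Int → String) (x : String) (a b : Int)
    (h : ∀ i : Int, a ≤ i → i < b → f i = x) :
    pvSeg f a b = List.replicate (b - a).toNat x := by
  apply List.eq_replicate_iff.mpr
  refine ⟨by simp [pvSeg], ?_⟩
  intro y hy
  unfold pvSeg at hy
  obtain ⟨j, hj, rfl⟩ := List.mem_map.mp hy
  simp only [List.mem_range] at hj
  exact h _ (by omega) (by omega)

theorem pvRunB_eq_seg (lo hi a b : Int) (hlh : lo ≤ hi) :
    pvRunB lo hi a b = pvSeg (pvBase lo hi) a b := by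
  unfold pvRunB
  by_cases hab : a ≤ b
  · -- cut points: lo and hi clamped into [a, b]
    have hc1 : (max (min b lo - a) 0).toNat = (max a (min b lo) - a).toNat := by omega
    have hc2 : (max (min b hi - max a lo) 0).toNat
        = (max a (min b hi) - max a (min b lo)).toNat := by omega
    have hc3 : (max (b - max a hi) 0).toNat = (b - max a (min b hi)).toNat := by omega
    rw [hc1, hc2, hc3]
    rw [← pvSeg_const (pvBase lo hi) "gray" a (max a (min b lo))
        (fun i h1 h2 => by simp only [pvBase]; rw [if_neg]; omega)]
    rw [← pvSeg_const (pvBase lo hi) "white" (max a (min b lo)) (max a (min b hi))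
        (fun i h1 h2 => by simp only [pvBase]; rw [if_pos]; omega)]
    rw [← pvSeg_const (pvBase lo hi) "gray" (max a (min b hi)) b
        (fun i h1 h2 => by simp only [pvBase]; rw [if_neg]; omega)]
    rw [pvSeg_append _ _ _ _ (by omega) (by omega),
        pvSeg_append _ _ _ _ (by omega) (by omega)]
  · have h1 : (max (min b lo - a) 0).toNat = 0 := by omega
    have h2 : (max (min b hi - max a lo) 0).toNat = 0 := by omega
    have h3 : (max (b - max a hi) 0).toNat = 0 := by omega
    have h4 : (b - a).toNat = 0 := by omega
    simp [h1, h2, h3, h4, pvSeg]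

theorem pvSeg_glue (f : Int → String) (a k b : Int) (h1 : a ≤ k) (h2 : k < b) :
    pvSeg f a k ++ f k :: pvSeg f (k + 1) b = pvSeg f a b := by
  rw [← pvSeg_append f a k b h1 (by omega)]
  congr 1
  rw [← pvSeg_append f k (k + 1) b (by omega) (by omega), pvSeg_single]
  rfl

theorem pvSeg_congr (f g : Int → String) (a b : Int)
    (h : ∀ i : Int, a ≤ i → i < b → f i = g i) : pvSeg f a b = pvSeg g a b := by
  unfold pvSeg
  apply List.map_congr_left
  intro j hj
  simp only [List.mem_range] at hj
  exact h _ (by omega) (by omega)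

/-- Main B-side loop invariant: folding the emit step over a sorted list of in-range,
strictly increasing override points whose values agree with `f`, where `f` is the base
colour away from the points, produces exactly the segment of `f`. -/
theorem pvEmit (lo hi len : Int) (f : Int → String) (hlh : lo ≤ hi) :
    ∀ (S : List (Int × String)) (pos : Int) (acc : List String),
      0 ≤ pos →
      (∀ p ∈ S, pos ≤ p.1 ∧ p.1 < len) →
      List.Pairwise (fun p q : Int × String => p.1 < q.1) S →
      (∀ p ∈ S, p.2 = f p.1) →
      (∀ i : Int, pos ≤ i → i < len → (∀ p ∈ S, p.1 ≠ i) → f i = pvBase lo hi i) →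
      (S.foldl (fun s ic => (s.1 ++ pvRunB lo hi s.2 ic.1 ++ [ic.2], ic.1 + 1)) (acc, pos)).1
        ++ pvRunB lo hi
            (S.foldl (fun s ic => (s.1 ++ pvRunB lo hi s.2 ic.1 ++ [ic.2], ic.1 + 1)) (acc, pos)).2 len
      = acc ++ pvSeg f pos len := by
  intro S
  induction S with
  | nil =>
    intro pos acc _ _ _ _ hgap
    simp only [List.foldl_nil]
    rw [pvRunB_eq_seg lo hi _ _ hlh, pvSeg_congr (pvBase lo hi) f pos len
      (fun i hi1 hi2 => (hgap i hi1 hi2 (by simp)).symm)]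
  | cons p S ih =>
    intro pos acc hpos hmem hsort hval hgap
    simp only [List.foldl_cons]
    have hp := hmem p (List.mem_cons_self ..)
    have hsort' := (List.pairwise_cons.mp hsort)
    rw [ih (p.1 + 1) (acc ++ pvRunB lo hi pos p.1 ++ [p.2]) (by omega)
      (fun q hq => ⟨by have := hsort'.1 q hq; omega, (hmem q (List.mem_cons_of_mem _ hq)).2⟩)
      hsort'.2
      (fun q hq => hval q (List.mem_cons_of_mem _ hq))
      (fun i hi1 hi2 hne => hgap i (by omega) hi2
        (by intro q hq; rcases List.mem_cons.mp hq with h | h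
            · subst h; omega
            · exact hne q h))]
    rw [pvRunB_eq_seg lo hi _ _ hlh, pvSeg_congr (pvBase lo hi) f pos p.1
      (fun i hi1 hi2 => (hgap i hi1 (by omega)
        (by intro q hq; rcases List.mem_cons.mp hq with h | h
            · subst h; omega
            · have := hsort'.1 q h; omega)).symm)]
    rw [hval p (List.mem_cons_self ..), ← pvSeg_glue f pos p.1 len hp.1 hp.2]
    simp

-- ---- the override-point list: shorthand and its four properties ----

/-- The point list B builds (the fold in `GetColourArrayQ_alt`, named for the proofs). -/
def pvPoints (length tail border curr_idx : Int) : List (Int × String) :=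
  [((tail : Int), "blue"), (border, "red"), (curr_idx, "yellow")].foldl
    (fun pts ic =>
      if 0 ≤ ic.1 ∧ ic.1 < length ∧ pts.all (fun p => decide (ic.1 ≠ p.1)) = true
      then pts ++ [ic] else pts) []

theorem pvPoints_range (length tail border curr_idx : Int) :
    ∀ p ∈ pvPoints length tail border curr_idx, 0 ≤ p.1 ∧ p.1 < length := by
  unfold pvPoints
  simp only [List.foldl_cons, List.foldl_nil, List.nil_append]
  split_ifs <;> intro p hp <;>
    simp only [List.mem_append, List.mem_singleton, List.not_mem_nil, false_or] at hp <;>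
    first
      | exact absurd hp id
      | (rcases hp with (rfl | rfl) | rfl <;> exact ⟨by omega, by omega⟩)
      | (rcases hp with rfl | rfl <;> exact ⟨by omega, by omega⟩)
      | (rcases hp with rfl <;> exact ⟨by omega, by omega⟩)

theorem pvPoints_nodup (length tail border curr_idx : Int) :
    ((pvPoints length tail border curr_idx).map Prod.fst).Nodup := by
  unfold pvPoints
  simp only [List.foldl_cons, List.foldl_nil]
  split_ifs <;> simp_all <;> omega

theorem pvPoints_val (length head tail border curr_idx : Int) :
    ∀ p ∈ pvPoints length tail border curr_idx,
      p.2 = pvColourAt head tail border curr_idx p.1 := by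
  unfold pvPoints
  simp only [List.foldl_cons, List.foldl_nil, List.nil_append]
  split_ifs <;> intro p hp <;>
    simp only [List.all_append, List.all_cons, List.all_nil, Bool.and_eq_true, decide_eq_true_eq, and_true, true_and] at * <;>
    simp only [List.mem_append, List.mem_singleton, List.not_mem_nil, false_or] at hp <;>
    first
      | exact absurd hp id
      | (rcases hp with (rfl | rfl) | rfl <;> simp only [pvColourAt] <;>
          split_ifs <;> first | rfl | (exfalso; omega))
      | (rcases hp with rfl | rfl <;> simp only [pvColourAt] <;>
          split_ifs <;> first | rfl | (exfalso; omega))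
      | (rcases hp with rfl <;> simp only [pvColourAt] <;>
          split_ifs <;> first | rfl | (exfalso; omega))

theorem pvPoints_complete (length tail border curr_idx : Int) :
    ∀ i : Int, 0 ≤ i → i < length → (i = tail ∨ i = border ∨ i = curr_idx) →
      ∃ p ∈ pvPoints length tail border curr_idx, p.1 = i := by
  unfold pvPoints
  simp only [List.foldl_cons, List.foldl_nil]
  split_ifs <;> intro i h0 h1 h2 <;> simp_all <;> omega

-- ---- the two maps agree ----

theorem pvB_eq_map (length head tail border curr_idx : Int) :
    GetColourArrayQ_alt length head tail border curr_idx
      = (List.range length.toNat).map (fun (k : Nat) => pvColourAt head tail border curr_idx (k : Int)) := by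
  have halt : GetColourArrayQ_alt length head tail border curr_idx
      = (let lo := max head 0
         let hi := max (min tail (length - 1) + 1) lo
         let S := PySem.List.sorted (pvPoints length tail border curr_idx) (fun p => p.1)
         let r := S.foldl (fun s ic => (s.1 ++ pvRunB lo hi s.2 ic.1 ++ [ic.2], ic.1 + 1))
           (([] : List String), (0 : Int))
         r.1 ++ pvRunB lo hi r.2 length) := rfl
  rw [halt]
  set lo := max head 0 with hlo
  set hi := max (min tail (length - 1) + 1) lo with hhi
  set P := pvPoints length tail border curr_idx with hP
  set S := PySem.List.sorted P (fun p => p.1) with hS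
  have hperm : S.Perm P := PySem.List.sorted_perm P (fun p => p.1) false
  have hmemS : ∀ p ∈ S, 0 ≤ p.1 ∧ p.1 < length := fun p hp =>
    pvPoints_range length tail border curr_idx p (hperm.mem_iff.mp hp)
  have hnodupS : (S.map Prod.fst).Nodup :=
    ((hperm.map Prod.fst).nodup_iff).mpr (pvPoints_nodup length tail border curr_idx)
  have hle : List.Pairwise (fun p q : Int × String => p.1 ≤ q.1) S :=
    PySem.List.sorted_pairwise P (fun p => p.1)
  have hne : List.Pairwise (fun p q : Int × String => p.1 ≠ q.1) S :=
    (List.pairwise_map.mp hnodupS)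
  have hlt : List.Pairwise (fun p q : Int × String => p.1 < q.1) S :=
    (hle.and hne).imp (fun h => lt_of_le_of_ne h.1 h.2)
  have hvalS : ∀ p ∈ S, p.2 = pvColourAt head tail border curr_idx p.1 := fun p hp =>
    pvPoints_val length head tail border curr_idx p (hperm.mem_iff.mp hp)
  have hgap : ∀ i : Int, (0 : Int) ≤ i → i < length → (∀ p ∈ S, p.1 ≠ i) →
      pvColourAt head tail border curr_idx i = pvBase lo hi i := by
    intro i h0 h1 hne'
    have hnospec : ¬ (i = tail ∨ i = border ∨ i = curr_idx) := by
      intro hsp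
      obtain ⟨p, hp, hpi⟩ := pvPoints_complete length tail border curr_idx i h0 h1 hsp
      exact hne' p (hperm.mem_iff.mpr hp) hpi
    simp only [not_or] at hnospec
    simp only [pvColourAt, pvBase, if_neg hnospec.1, if_neg hnospec.2.1, if_neg hnospec.2.2]
    split_ifs <;> first | rfl | (exfalso; omega)
  have hlh : lo ≤ hi := by rw [hhi]; exact le_max_right _ _
  have := pvEmit lo hi length (pvColourAt head tail border curr_idx) hlh S 0 [] le_rfl
    hmemS hlt hvalS hgap
  simp only [List.nil_append] at this
  rw [this]
  unfold pvSeg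
  simp

-- ===== VERDICT (by name: the statement is the Claim_ definition above) =====
theorem GetColourArrayQ_spec : Claim_equal_GetColourArrayQ := by
  intro length head tail border curr_idx _
  unfold Spec_GetColourArrayQ
  rw [pvA_eq_map, pvB_eq_map]
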